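-- pv_equiv track=rewrite | github.com/Anton23Pyt/html | main.py | find
-- ===== SOURCE A (Python) =====
-- def find(tag):
--     cut = []
--     for i in str(tag):
--         cut.append(i)
--         if i == ">":
--             yi = 0
--             yo = 0
--             for i in range(0, len(cut)):
--                 if cut[i] == "<":
--                     yi = yi + 1
--                 if cut[i] == ">":
--                     yo = yo + 1
--             if yo == yi:
--                 break
--     h = '\ '
--     h = h.replace(' ', '')
--     for i in range(0, len(cut)):
--         h = h + cut[i]
--     h = h + '(.*?)\</p>'
--     return h
-- ===== SOURCE B (Python) =====
-- def find(tag):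
--     # One pass with running '<'/'>' counters instead of rescanning the prefix on each '>'.
--     out = []
--     lt = 0
--     gt = 0
--     for c in str(tag):
--         out.append(c)
--         if c == '<':
--             lt += 1
--         elif c == '>':
--             gt += 1
--             if gt == lt:
--                 break
--     return '\\' + ''.join(out) + '(.*?)\\</p>'
-- ===== Notes on version B (the rewrite author's own statement) =====
-- stated objective: faster
-- what changed: B keeps running counts of '<' and '>' while scanning once, instead of A's full rescan of the accumulated prefix at every '>', and builds the result with join instead of char-by-char concatenation.
import Mathlib
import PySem

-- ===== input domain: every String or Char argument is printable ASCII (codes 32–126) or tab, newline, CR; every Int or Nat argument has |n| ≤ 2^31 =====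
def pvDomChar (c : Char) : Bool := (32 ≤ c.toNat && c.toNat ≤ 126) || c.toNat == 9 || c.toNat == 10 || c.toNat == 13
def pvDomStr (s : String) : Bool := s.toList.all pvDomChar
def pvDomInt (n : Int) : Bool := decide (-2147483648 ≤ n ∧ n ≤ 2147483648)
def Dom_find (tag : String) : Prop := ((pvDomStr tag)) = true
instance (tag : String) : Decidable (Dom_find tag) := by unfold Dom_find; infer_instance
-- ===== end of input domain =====

-- B replaces A's full rescan of the accumulated prefix at every '>' by running counters
-- kept during one pass (O(n) instead of O(n^2)); objective: faster.

-- ===== PORT A =====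
-- inner loop: for i in range(0, len(cut)): yi/yo counting, accumulated forward
def pvCountLoop : List Char → Nat → Nat → Nat × Nat
  | [], yi, yo => (yi, yo)
  | c :: rest, yi, yo =>
      pvCountLoop rest (if c = '<' then yi + 1 else yi) (if c = '>' then yo + 1 else yo)

-- outer loop: for i in str(tag): append; on '>' recount and maybe break
def pvFindLoopA (cut : List Char) : List Char → List Char
  | [] => cut
  | c :: rest =>
      let cut' := cut ++ [c]
      if c = '>' then
        let p := pvCountLoop cut' 0 0
        if p.2 = p.1 then cut' else pvFindLoopA cut' rest
      else pvFindLoopA cut' rest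

def find (tag : String) : String :=
  ((pvFindLoopA [] tag.toList).foldl String.push   -- for i: h = h + cut[i], from h = '\\ '.replace(' ','')
      (PySem.Str.replace "\\ " " " "")) ++ "(.*?)\\</p>"

-- ===== PORT B =====
-- one pass, running counters lt/gt; the taken prefix is returned directly
def pvFindLoopB : List Char → Nat → Nat → List Char
  | [], _, _ => []
  | c :: rest, lt, gt =>
      if c = '<' then c :: pvFindLoopB rest (lt + 1) gt
      else if c = '>' then
        if gt + 1 = lt then [c] else c :: pvFindLoopB rest lt (gt + 1)
      else c :: pvFindLoopB rest lt gt

def find_alt (tag : String) : String :=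
  "\\" ++ String.ofList (pvFindLoopB tag.toList 0 0) ++ "(.*?)\\</p>"

-- ===== PRECONDITION & SPEC =====
def Spec_find (tag : String) (out : String) : Prop := out = find_alt tag
instance (tag : String) (out : String) : Decidable (Spec_find tag out) := by unfold Spec_find; infer_instance

-- ===== CLAIM (what is proved, stated in full; the proofs are below) =====
def Claim_equal_find : Prop := ∀ (tag : String), Dom_find tag → Spec_find tag (find tag)

-- ===== LEMMAS AND PROOFS =====
theorem pvCountLoop_eq (l : List Char) : ∀ yi yo, pvCountLoop l yi yo = (yi + l.count '<', yo + l.count '>') := by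
  induction l with
  | nil => intro yi yo; simp [pvCountLoop]
  | cons c rest ih =>
      intro yi yo
      simp only [pvCountLoop, ih, List.count_cons, Prod.mk.injEq, beq_iff_eq]
      constructor <;> split_ifs <;> omega

theorem pvLoop_eq (rest : List Char) : ∀ cut : List Char,
    pvFindLoopA cut rest = cut ++ pvFindLoopB rest (cut.count '<') (cut.count '>') := by
  induction rest with
  | nil => intro cut; simp [pvFindLoopA, pvFindLoopB]
  | cons c rest ih =>
      intro cut
      simp only [pvFindLoopA, pvFindLoopB, pvCountLoop_eq]
      by_cases hlt : c = '<'
      · subst hlt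
        have hne : ('<' : Char) ≠ '>' := by decide
        simp [hne, ih, List.count_append]
      · by_cases hgt : c = '>'
        · subst hgt
          have h1 : (cut ++ ['>']).count '<' = cut.count '<' := by
            simp [List.count_append]
          have h2 : (cut ++ ['>']).count '>' = cut.count '>' + 1 := by
            simp [List.count_append]
          by_cases he : cut.count '>' + 1 = cut.count '<'
          · simp [hlt, h1, h2, he]
          · simp [hlt, h1, h2, he, ih]
        · simp [hlt, hgt, ih, List.count_append]

theorem foldl_push_toList (l : List Char) : ∀ s : String,
    (l.foldl String.push s).toList = s.toList ++ l := by
  induction l with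
  | nil => intro s; simp
  | cons c rest ih => intro s; simp [List.foldl, ih]

-- ===== VERDICT (by name: the statement is the Claim_ definition above) =====
theorem find_spec : Claim_equal_find := by
  intro tag _
  show find tag = find_alt tag
  refine String.toList_inj.mp ?_
  have hrepl : PySem.Str.replace "\\ " " " "" = "\\" := by decide
  simp [find, find_alt, pvLoop_eq, foldl_push_toList, hrepl]
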